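-- pv_equiv track=rewrite | github.com/Xrenya/Algorithms | yandex/Lecture_5/Lecture/main.py | countprefixsum
-- ===== SOURCE A (Python) =====
-- def countprefixsum(nums):
--     prefixsumbyvalue = {0: 1}
--     nowsum = 0
--     for now in nums:
--         nowsum += now
--         if nowsum not in prefixsumbyvalue:
--             prefixsumbyvalue[nowsum] = 0
--         prefixsumbyvalue[nowsum] += 1
--     return prefixsumbyvalue
-- ===== SOURCE B (Python) =====
-- def countprefixsum(nums):
--     # Two separate passes: build the full prefix-sum sequence first, then tally it.
--     prefixes = [0]
--     s = 0
--     for x in nums: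
--         s += x
--         prefixes.append(s)
--     counts = {}
--     for v in prefixes:
--         counts[v] = counts.get(v, 0) + 1
--     return counts
-- ===== Notes on version B (the rewrite author's own statement) =====
-- stated objective: alternative
-- what changed: Replaces the single fused loop that updates a dict while accumulating with two shaped passes: first build the list of prefix sums (0 included), then tally that list into a dict with get-based increments.
import Mathlib
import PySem

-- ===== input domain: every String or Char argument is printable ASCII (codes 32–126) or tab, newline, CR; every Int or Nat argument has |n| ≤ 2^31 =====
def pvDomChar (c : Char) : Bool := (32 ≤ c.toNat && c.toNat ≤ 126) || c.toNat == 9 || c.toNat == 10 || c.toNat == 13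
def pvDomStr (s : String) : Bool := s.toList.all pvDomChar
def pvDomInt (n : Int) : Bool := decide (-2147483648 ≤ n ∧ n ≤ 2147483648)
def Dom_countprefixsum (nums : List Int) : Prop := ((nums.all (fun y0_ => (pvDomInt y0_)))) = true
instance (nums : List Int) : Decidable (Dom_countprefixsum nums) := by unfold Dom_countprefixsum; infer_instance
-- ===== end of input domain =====

-- B builds the prefix-sum list first and tallies it in a second pass, instead of A's
-- single fused loop updating the dict while accumulating (same cost, different decomposition).

-- ===== PORT A =====
-- one fused loop: state is (dict, running sum); membership test then increment
def countprefixsum (nums : List Int) : List (Int × Int) :=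
  (nums.foldl
    (fun (st : PySem.Dict Int Int × Int) now =>
      let nowsum := st.2 + now
      let d := if st.1.contains nowsum then st.1 else st.1.insert nowsum 0
      (d.insert nowsum (d.getD nowsum 0 + 1), nowsum))
    ((PySem.Dict.empty).insert 0 1, 0)).1.items

-- ===== PORT B =====
-- pass 1: build the prefix-sum list (0 included); pass 2: tally it via get-with-default
def countprefixsum_alt (nums : List Int) : List (Int × Int) :=
  let prefixes :=
    (nums.foldl
      (fun (st : List Int × Int) x =>
        let s := st.2 + x
        (st.1 ++ [s], s))
      ([0], 0)).1
  (prefixes.foldl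
    (fun (d : PySem.Dict Int Int) v => d.insert v (d.getD v 0 + 1))
    PySem.Dict.empty).items

-- ===== PRECONDITION & SPEC =====
def Spec_countprefixsum (nums : List Int) (out : List (Int × Int)) : Prop := out = countprefixsum_alt nums
instance (nums : List Int) (out : List (Int × Int)) : Decidable (Spec_countprefixsum nums out) := by unfold Spec_countprefixsum; infer_instance

-- ===== CLAIM (what is proved, stated in full; the proofs are below) =====
def Claim_equal_countprefixsum : Prop := ∀ (nums : List Int), Dom_countprefixsum nums → Spec_countprefixsum nums (countprefixsum nums)

-- ===== LEMMAS AND PROOFS =====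

-- the prefix sums of nums starting from running sum s
def pvPrefixes : List Int → Int → List Int
  | [], _ => []
  | x :: xs, s => (s + x) :: pvPrefixes xs (s + x)

-- A's per-element dict update equals B's counting step
theorem pvStep_eq (d : PySem.Dict Int Int) (s : Int) :
    (let d1 := if d.contains s then d else d.insert s 0
     d1.insert s (d1.getD s 0 + 1)) = d.insert s (d.getD s 0 + 1) := by
  by_cases h : d.contains s
  · simp [h]
  · simp only [Bool.not_eq_true] at h
    rw [PySem.Dict.getD_of_not_contains (h := h)]
    simp [h, PySem.Dict.getD_insert_self, PySem.Dict.insert_insert_self]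

theorem pvB_prefixes (nums : List Int) (acc : List Int) (s : Int) :
    (nums.foldl (fun (st : List Int × Int) x => (st.1 ++ [st.2 + x], st.2 + x)) (acc, s)).1
      = acc ++ pvPrefixes nums s := by
  induction nums generalizing acc s with
  | nil => simp [pvPrefixes]
  | cons x xs ih => simp [pvPrefixes, ih]

theorem pvA_fold (nums : List Int) (d : PySem.Dict Int Int) (s : Int) :
    (nums.foldl
      (fun (st : PySem.Dict Int Int × Int) now =>
        let nowsum := st.2 + now
        let d := if st.1.contains nowsum then st.1 else st.1.insert nowsum 0
        (d.insert nowsum (d.getD nowsum 0 + 1), nowsum)) (d, s)).1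
      = (pvPrefixes nums s).foldl
          (fun (d : PySem.Dict Int Int) v => d.insert v (d.getD v 0 + 1)) d := by
  induction nums generalizing d s with
  | nil => simp [pvPrefixes]
  | cons x xs ih =>
    simp only [List.foldl_cons, pvPrefixes]
    rw [ih]
    congr 1
    exact pvStep_eq d (s + x)

-- ===== VERDICT (by name: the statement is the Claim_ definition above) =====
theorem countprefixsum_spec : Claim_equal_countprefixsum := by
  intro nums _
  unfold Spec_countprefixsum countprefixsum countprefixsum_alt
  rw [pvB_prefixes nums [0] 0, pvA_fold nums _ 0]
  rfl
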